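-- pv_equiv track=rewrite | github.com/hekaplex/FocusSeq2Seq | do_evaluate5.py | clean_predicted_hypo
-- ===== SOURCE A (Python) =====
-- from collections import Counter
--
-- def clean_predicted_hypo(unclean_hypo):
--     sentences = unclean_hypo.split(".")
--     last_sentence = sentences[-1]
--     last_sentence_nr_of_words = len(last_sentence.split(" "))
--     # check for the number of words
--     if last_sentence_nr_of_words <= 3:
--         full_text = ".".join(sentences[:-1]) + "."
--         return full_text
--
--     # check for stupid repetitions in the last sentence
--     lower_tokens = [token.lower().strip() for token in last_sentence.strip().split(" ")]
--     counts = Counter(lower_tokens)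
--     for key, count in counts.items():
--         if count >= 5:
--             full_text = ".".join(sentences[:-1]) + "."
--             return full_text
--
--     return unclean_hypo
-- ===== SOURCE B (Python) =====
-- def clean_predicted_hypo(unclean_hypo):
--     last_sentence = unclean_hypo.split(".")[-1]
--     # everything up to and including the last '.'; "." when there is no dot at all
--     kept = unclean_hypo[:len(unclean_hypo) - len(last_sentence)] or "."
--     if last_sentence.count(" ") <= 2:
--         return kept
--     tokens = sorted(t.lower().strip() for t in last_sentence.strip().split(" "))
--     if any(a == b for a, b in zip(tokens, tokens[4:])):
--         return kept
--     return unclean_hypo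
-- ===== Notes on version B (the rewrite author's own statement) =====
-- stated objective: alternative
-- what changed: B rebuilds the truncated text by slicing the original string up to the last dot instead of re-joining the dropped sentences, replaces the word-count split by counting space separators, and replaces the Counter-based repetition test by sorting the lowercased tokens and comparing the sorted list with its 4-shift (a token occurs at least 5 times iff two sorted tokens 4 positions apart coincide).
import Mathlib
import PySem

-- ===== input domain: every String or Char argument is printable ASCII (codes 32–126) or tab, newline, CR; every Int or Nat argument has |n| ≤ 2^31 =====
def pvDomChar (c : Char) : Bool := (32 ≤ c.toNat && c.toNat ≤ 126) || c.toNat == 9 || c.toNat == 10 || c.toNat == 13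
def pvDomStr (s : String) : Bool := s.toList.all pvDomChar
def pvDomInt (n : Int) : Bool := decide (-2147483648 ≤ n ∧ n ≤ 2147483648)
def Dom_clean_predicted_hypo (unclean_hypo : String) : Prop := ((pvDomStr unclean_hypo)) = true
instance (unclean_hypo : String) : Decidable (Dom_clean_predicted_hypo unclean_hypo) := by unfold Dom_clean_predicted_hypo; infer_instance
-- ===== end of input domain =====

-- B rebuilds the truncated text by slicing the original string at the last '.' (no join),
-- replaces the word-count split by counting separators, and detects a ≥5-times token by
-- sorting the tokens and comparing the sorted list with its 4-shift (no Counter);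
-- objective: alternative (same cost, different decomposition and data structure).

-- ===== PORT A =====
-- s.split(sep) with a non-empty literal sep: PySem.Str.split? is none only for sep = ""
def pySplit (s sep : String) : List String := (PySem.Str.split? s sep).getD []

def clean_predicted_hypo (unclean_hypo : String) : String :=
  let sentences := pySplit unclean_hypo "."
  let last_sentence := sentences.getLastD ""   -- sentences[-1]; split never returns []
  let last_sentence_nr_of_words := (pySplit last_sentence " ").length
  if last_sentence_nr_of_words ≤ 3 then
    PySem.Str.join "." sentences.dropLast ++ "."
  else
    let lower_tokens := (pySplit (PySem.Str.strip last_sentence) " ").map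
      (fun token => PySem.Str.strip (PySem.Str.lower token))
    let counts := PySem.Dict.counter lower_tokens
    -- 'for key, count in counts.items(): if count >= 5: return full_text' = first hit decides
    if counts.items.any (fun p => 5 ≤ p.2) then
      PySem.Str.join "." sentences.dropLast ++ "."
    else
      unclean_hypo

-- ===== PORT B =====
def clean_predicted_hypo_alt (unclean_hypo : String) : String :=
  let last_sentence := (pySplit unclean_hypo ".").getLastD ""
  -- unclean_hypo[:len(unclean_hypo) - len(last_sentence)] or "."
  let kept0 := PySem.Str.slice unclean_hypo none
    (some (PySem.Str.len unclean_hypo - PySem.Str.len last_sentence))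
  let kept := if kept0 = "" then "." else kept0
  if PySem.Str.count last_sentence " " ≤ 2 then
    kept
  else
    let tokens := PySem.List.sorted ((pySplit (PySem.Str.strip last_sentence) " ").map
      (fun t => PySem.Str.strip (PySem.Str.lower t))) (fun x => x)
    -- any(a == b for a, b in zip(tokens, tokens[4:]))
    if (tokens.zip (tokens.drop 4)).any (fun p => p.1 == p.2) then
      kept
    else
      unclean_hypo

-- ===== PRECONDITION & SPEC =====
def Spec_clean_predicted_hypo (unclean_hypo : String) (out : String) : Prop := out = clean_predicted_hypo_alt unclean_hypo
instance (unclean_hypo : String) (out : String) : Decidable (Spec_clean_predicted_hypo unclean_hypo out) := by unfold Spec_clean_predicted_hypo; infer_instance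

-- ===== CLAIM (what is proved, stated in full; the proofs are below) =====
def Claim_equal_clean_predicted_hypo : Prop := ∀ (unclean_hypo : String), Dom_clean_predicted_hypo unclean_hypo → Spec_clean_predicted_hypo unclean_hypo (clean_predicted_hypo unclean_hypo)

-- ===== LEMMAS AND PROOFS =====

-- PySem's fuelled splitter, on a single-character separator, is Mathlib's List.splitOn.
theorem splitOn_go_single (c : Char) (l cur : List Char) (acc : List (List Char)) (fuel : Nat)
    (h : l.length ≤ fuel) :
    PySem.Chars.splitOn.go [c] fuel l cur acc =
      acc.reverse ++ (List.splitOn c l).modifyHead (cur.reverse ++ ·) := by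
  induction l generalizing fuel cur acc with
  | nil =>
    cases fuel with
    | zero => simp [PySem.Chars.splitOn.go, List.splitOn]
    | succ n => simp [PySem.Chars.splitOn.go, List.splitOn]
  | cons a rest ih =>
    cases fuel with
    | zero => simp at h
    | succ n =>
      rw [PySem.Chars.splitOn.go]
      by_cases hc : a = c
      · subst hc
        simp only [List.isPrefixOf, beq_self_eq_true, Bool.true_and, if_true, List.length_cons, List.length_nil, List.drop_succ_cons, List.drop_zero]
        rw [ih [] ((cur.reverse) :: acc) n (by simpa using h)]
        simp [List.splitOn, List.splitOnP_cons]
        cases List.splitOnP (fun x => x == a) rest <;> rfl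
      · have hpre : ([c].isPrefixOf (a :: rest)) = false := by
          simp [List.isPrefixOf]
          exact fun hb => absurd hb.symm hc
        rw [hpre]
        simp only [Bool.false_eq_true, if_false]
        rw [ih (a :: cur) acc n (by simpa using h)]
        have hne := List.splitOnP_ne_nil (fun x => x == c) rest
        obtain ⟨hd, tl, heq⟩ := List.exists_cons_of_ne_nil hne
        simp [List.splitOn, List.splitOnP_cons, hc, heq]
theorem splitOn_single (c : Char) (cs : List Char) :
    PySem.Chars.splitOn cs [c] = List.splitOn c cs := by
  rw [PySem.Chars.splitOn, splitOn_go_single c cs [] [] (cs.length + 1) (by omega)]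
  simp
  cases List.splitOn c cs <;> rfl
theorem count_go_single (c : Char) (l : List Char) (acc : Nat) (fuel : Nat)
    (h : l.length ≤ fuel) :
    PySem.Chars.count.go [c] fuel l acc = acc + l.count c := by
  induction l generalizing fuel acc with
  | nil => cases fuel <;> simp [PySem.Chars.count.go]
  | cons a rest ih =>
    cases fuel with
    | zero => simp at h
    | succ n =>
      rw [PySem.Chars.count.go]
      by_cases hc : a = c
      · subst hc
        simp only [List.isPrefixOf, beq_self_eq_true, Bool.true_and, if_true,
          List.length_cons, List.length_nil, List.drop_succ_cons, List.drop_zero]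
        rw [ih (acc + 1) n (by simpa using h)]
        simp
        omega
      · have hpre : ([c].isPrefixOf (a :: rest)) = false := by
          simp [List.isPrefixOf]
          exact fun hb => absurd hb.symm hc
        rw [hpre]
        simp only [Bool.false_eq_true, if_false]
        rw [ih acc n (by simpa using h)]
        simp [hc]
theorem count_single (c : Char) (cs : List Char) :
    PySem.Chars.count cs [c] = cs.count c := by
  rw [PySem.Chars.count]
  simp only [List.isEmpty_cons, Bool.false_eq_true, if_false]
  rw [count_go_single c cs 0 cs.length le_rfl]
  omega
theorem length_splitOn (c : Char) (cs : List Char) :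
    (List.splitOn c cs).length = cs.count c + 1 := by
  induction cs with
  | nil => simp
  | cons a rest ih =>
    simp only [List.splitOn, List.splitOnP_cons] at *
    by_cases hc : a = c
    · subst hc
      simp [ih]
    · simp [hc, List.length_modifyHead, ih]
theorem intercalate_concat (x : Char) (q : List (List Char)) (lst : List Char) (hq : q ≠ []) :
    [x].intercalate (q ++ [lst]) = [x].intercalate q ++ x :: lst := by
  induction q with
  | nil => simp at hq
  | cons a rest ih =>
    cases rest with
    | nil => simp [List.intercalate, List.intersperse]
    | cons b tl =>
      have hstep : ∀ (ys : List (List Char)) (a b : List Char),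
          [x].intercalate (a :: b :: ys) = a ++ x :: [x].intercalate (b :: ys) := by
        intro ys a b
        simp [List.intercalate, List.intersperse]
      have := ih (by simp)
      simp only [List.cons_append] at *
      rw [hstep, this, hstep]
      simp
theorem pySplit_single (s : String) (c : Char) :
    pySplit s (String.ofList [c]) = (List.splitOn c s.toList).map String.ofList := by
  rw [pySplit, PySem.Str.split?]
  have htl : (String.ofList [c]).toList = [c] := by simp
  rw [htl, PySem.Chars.split?]
  simp [splitOn_single]
theorem run_of_pair (s : List String)
    (hmono : ∀ (p q : Nat) (hpq : p ≤ q) (hq : q < s.length), s[p]'(Nat.lt_of_le_of_lt hpq hq) ≤ s[q])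
    {i : Nat} (hi : i + 4 < s.length) (heq : s[i]'(by omega) = s[i + 4]) :
    5 ≤ s.count (s[i]'(by omega)) := by
  have hsub : (List.replicate 5 (s[i]'(by omega))).Sublist s := by
    have hrepl : (s.drop i).take 5 = List.replicate 5 (s[i]'(by omega)) := by
      apply List.ext_getElem
      · simp; omega
      · intro j hj _
        have hj5 : j < 5 := by
          have := hj
          simp at this
          omega
        have hij : i + j < s.length := by omega
        have h1 : s[i]'(by omega) ≤ s[i + j] := hmono i (i + j) (by omega) hij
        have h2 : s[i + j] ≤ s[i + 4] := hmono (i + j) (i + 4) (by omega) hi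
        simp only [List.getElem_take, List.getElem_drop, List.getElem_replicate]
        exact le_antisymm (heq ▸ h2) h1
    rw [← hrepl]
    exact ((s.drop i).take_sublist 5).trans (s.drop_sublist i)
  exact List.replicate_sublist_iff.mp hsub

-- Conversely, a token counted ≥5 times in the sorted list yields such a pair.
theorem pair_of_count (s : List String)
    (hmono : ∀ (p q : Nat) (hpq : p ≤ q) (hq : q < s.length), s[p]'(Nat.lt_of_le_of_lt hpq hq) ≤ s[q])
    {t : String} (h5 : 5 ≤ s.count t) :
    ∃ i : Nat, ∃ h : i + 4 < s.length, s[i]'(by omega) = s[i + 4] := by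
  have hsub : (List.replicate 5 t).Sublist s := List.replicate_sublist_iff.mpr h5
  obtain ⟨is, hmap, hpw⟩ := List.sublist_eq_map_getElem hsub
  have hlen : is.length = 5 := by
    have := congrArg List.length hmap
    simpa using this.symm
  have hget : ∀ (k : Nat) (hk : k < 5), s[(is[k]'(by omega) : Fin s.length)] = t := by
    intro k hk
    have h2 : (List.replicate 5 t)[k]'(by simp [hk]) = s[(is[k]'(by omega) : Fin s.length)] := by
      rw [List.getElem_of_eq hmap]
      simp
    rw [← h2, List.getElem_replicate]
  have hlt : ∀ (a b : Nat) (ha : a < 5) (hb : b < 5), a < b →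
      (is[a]'(by omega) : Fin s.length) < is[b]'(by omega) := by
    intro a b ha hb hab
    exact List.pairwise_iff_getElem.mp hpw a b (by omega) (by omega) hab
  have c0 := hlt 0 1 (by omega) (by omega) (by omega)
  have c1 := hlt 1 2 (by omega) (by omega) (by omega)
  have c2 := hlt 2 3 (by omega) (by omega) (by omega)
  have c3 := hlt 3 4 (by omega) (by omega) (by omega)
  set i0 : Fin s.length := is[0]'(by omega) with hi0
  set i4 : Fin s.length := is[4]'(by omega) with hi4
  have hgap : (i0 : Nat) + 4 ≤ (i4 : Nat) := by
    have := Fin.lt_def.mp c0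
    have := Fin.lt_def.mp c1
    have := Fin.lt_def.mp c2
    have := Fin.lt_def.mp c3
    omega
  refine ⟨(i0 : Nat), by omega, ?_⟩
  have ht0 : s[(i0 : Nat)]'(i0.isLt) = t := hget 0 (by omega)
  have ht4 : s[(i4 : Nat)]'(i4.isLt) = t := hget 4 (by omega)
  have hle1 : s[(i0 : Nat)]'(i0.isLt) ≤ s[(i0 : Nat) + 4] := hmono _ _ (by omega) (by omega)
  have hle2 : s[(i0 : Nat) + 4]'(by omega) ≤ s[(i4 : Nat)]'(i4.isLt) := hmono _ _ hgap i4.isLt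
  exact le_antisymm hle1 (by rw [ht0]; exact ht4 ▸ hle2)

-- The Counter scan and the shifted-zip scan over the sorted tokens agree.
theorem detect_eq (l : List String) :
    ((PySem.Dict.counter l).items.any (fun p => 5 ≤ p.2)) =
    (((PySem.List.sorted l (fun x => x)).zip ((PySem.List.sorted l (fun x => x)).drop 4)).any
      (fun p => p.1 == p.2)) := by
  set s := PySem.List.sorted l (fun x => x) with hs
  have hmono : ∀ (p q : Nat) (hpq : p ≤ q) (hq : q < s.length),
      s[p]'(Nat.lt_of_le_of_lt hpq hq) ≤ s[q] := by
    intro p q hpq hq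
    exact PySem.List.sorted_id_getElem_mono l hpq hq
  have hperm : s.Perm l := PySem.List.sorted_perm l (fun x => x) false
  apply Bool.eq_iff_iff.mpr
  simp only [List.any_eq_true, PySem.Dict.items_counter, List.mem_map, decide_eq_true_eq]
  constructor
  · rintro ⟨p, ⟨t, htmem, rfl⟩, hcnt⟩
    have h5 : 5 ≤ s.count t := by
      rw [hperm.count_eq]
      have h : (5 : Int) ≤ (l.count t : Int) := hcnt
      exact_mod_cast h
    obtain ⟨i, hi, heq⟩ := pair_of_count s hmono h5
    have hzlen : i < (s.zip (s.drop 4)).length := by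
      simp [List.length_zip, List.length_drop]
      omega
    refine ⟨(s.zip (s.drop 4))[i], List.getElem_mem _, ?_⟩
    simp only [List.getElem_zip, List.getElem_drop, beq_iff_eq]
    simpa [Nat.add_comm] using heq
  · rintro ⟨p, hmem, hbeq⟩
    obtain ⟨i, hzlen, rfl⟩ := List.mem_iff_getElem.mp hmem
    have hi4 : i + 4 < s.length := by
      simp [List.length_zip, List.length_drop] at hzlen
      omega
    simp only [List.getElem_zip, List.getElem_drop, beq_iff_eq] at hbeq
    have hbeq' : s[i]'(by omega) = s[i + 4]'(hi4) := by simpa [Nat.add_comm] using hbeq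
    have h5 : 5 ≤ s.count (s[i]'(by omega)) := run_of_pair s hmono hi4 hbeq'
    set t := s[i]'(by omega) with ht
    have htl : t ∈ l := hperm.mem_iff.mp (by exact List.getElem_mem _)
    refine ⟨(t, (l.count t : Int)), ⟨t, (PySem.Set.mem_ofList l t).mpr htl, rfl⟩, ?_⟩
    have h : 5 ≤ l.count t := hperm.count_eq t ▸ h5
    show (5 : Int) ≤ (l.count t : Int)
    exact_mod_cast h
-- The reconstructed prefix: A's ".".join(sentences[:-1]) + "." equals B's slice-or-dot.
theorem kept_eq (u : String) (q : List (List Char)) (lst : List Char)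
    (hql : List.splitOn '.' u.toList = q ++ [lst]) :
    PySem.Str.join "." (q.map String.ofList) ++ "." =
      (if PySem.Str.slice u none (some (PySem.Str.len u - PySem.Str.len (String.ofList lst))) = ""
       then "."
       else PySem.Str.slice u none (some (PySem.Str.len u - PySem.Str.len (String.ofList lst)))) := by
  have hinter : [('.' : Char)].intercalate (q ++ [lst]) = u.toList := by
    rw [← hql]; exact List.intercalate_splitOn u.toList '.'
  have hlenu : PySem.Str.len u = (u.toList.length : Int) := rfl
  have hlenl : PySem.Str.len (String.ofList lst) = (lst.length : Int) := by
    rw [PySem.Str.len, String.toList_ofList]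
  cases q with
  | nil =>
    have hcs : u.toList = lst := by simpa [List.intercalate] using hinter.symm
    have hb : PySem.Str.len u - PySem.Str.len (String.ofList lst) = 0 := by
      rw [hlenu, hlenl, hcs]; ring
    have hsl : PySem.Str.slice u none (some 0) = "" := by
      rw [← String.toList_inj, PySem.Str.toList_slice]
      simp [PySem.Chars.slice_eq_listSlice, PySem.List.slice_to]
    rw [hb, hsl, if_pos rfl, ← String.toList_inj]
    simp [PySem.Str.toList_join, PySem.Chars.join, List.intercalate]
  | cons a q' =>
    have hI : u.toList = [('.' : Char)].intercalate (a :: q') ++ '.' :: lst := by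
      rw [← hinter, intercalate_concat '.' (a :: q') lst (by simp)]
    have hb : PySem.Str.len u - PySem.Str.len (String.ofList lst) =
        ((([('.' : Char)].intercalate (a :: q')).length + 1 : Nat) : Int) := by
      rw [hlenu, hlenl, hI]
      push_cast
      simp
      ring
    have hsl : (PySem.Str.slice u none
        (some (PySem.Str.len u - PySem.Str.len (String.ofList lst)))).toList =
        [('.' : Char)].intercalate (a :: q') ++ ['.'] := by
      rw [PySem.Str.toList_slice, PySem.Chars.slice_eq_listSlice, hb,
        PySem.List.slice_to _ (by positivity)]
      rw [hI, show [('.' : Char)].intercalate (a :: q') ++ '.' :: lst =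
        ([('.' : Char)].intercalate (a :: q') ++ ['.']) ++ lst by simp]
      rw [Int.toNat_natCast]
      exact List.take_left' (by simp)
    have hne : PySem.Str.slice u none
        (some (PySem.Str.len u - PySem.Str.len (String.ofList lst))) ≠ "" := by
      intro h
      rw [← String.toList_inj, hsl] at h
      simp at h
    rw [if_neg hne, ← String.toList_inj, String.toList_append, PySem.Str.toList_join, hsl]
    simp [PySem.Chars.join, List.map_map, Function.comp_def]

-- ===== VERDICT (by name: the statement is the Claim_ definition above) =====
theorem clean_predicted_hypo_spec : Claim_equal_clean_predicted_hypo := by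
  intro u _
  unfold Spec_clean_predicted_hypo
  simp only [clean_predicted_hypo, clean_predicted_hypo_alt]
  have hparts : pySplit u "." = (List.splitOn '.' u.toList).map String.ofList :=
    pySplit_single u '.'
  have hne : List.splitOn '.' u.toList ≠ [] := List.splitOnP_ne_nil _ _
  obtain ⟨q, lst, hql⟩ : ∃ q lst, List.splitOn '.' u.toList = q ++ [lst] := by
    rcases List.eq_nil_or_concat (List.splitOn '.' u.toList) with h | ⟨q, b, h⟩
    · exact absurd h hne
    · exact ⟨q, b, by simpa using h⟩
  have hlast : (pySplit u ".").getLastD "" = String.ofList lst := by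
    rw [hparts, hql]; simp
  have hdrop : (pySplit u ".").dropLast = q.map String.ofList := by
    rw [hparts, hql]; simp
  rw [hlast, hdrop]
  have hlen : (pySplit (String.ofList lst) " ").length = lst.count ' ' + 1 := by
    rw [show (" " : String) = String.ofList [' '] from rfl,
      pySplit_single (String.ofList lst) ' ', List.length_map, String.toList_ofList,
      length_splitOn]
  have hcount : PySem.Str.count (String.ofList lst) " " = lst.count ' ' := by
    rw [PySem.Str.count, String.toList_ofList, show (" " : String).toList = [' '] from rfl]
    exact count_single ' ' lst
  rw [hlen, hcount]
  by_cases hg : lst.count ' ' ≤ 2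
  · rw [if_pos (by omega), if_pos hg]
    exact kept_eq u q lst hql
  · rw [if_neg (by omega), if_neg hg, detect_eq, kept_eq u q lst hql]
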